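-- pv_equiv track=rewrite | github.com/hunminkim98/Calibration_with_keypoints | simple_0427.py | extract_individual_camera_keypoints
-- ===== SOURCE A (Python) =====
-- def extract_individual_camera_keypoints(paired_keypoints_list):
--     """
--     Extracts individual camera keypoints from a list of paired keypoints.
--
--     Args:
--         paired_keypoints_list (list): A list of paired keypoints.
--
--     Returns:
--         tuple: A tuple containing two dictionaries. The first dictionary contains the keypoints
--         for Camera1, where the keys are in the format "Camera1_1-X" (e.g., "Camera1_1-2", "Camera1_1-3", etc.),
--         and the values are lists of keypoints for each frame. The second dictionary contains the keypoints
--         for other cameras, where the keys are the camera indices (starting from 2), and the values are lists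
--         of keypoints for each frame.
--     """
--     camera1_keypoints_pairs = {}
--
--     for i, camera_pair in enumerate(paired_keypoints_list):
--         other_camera_index = i + 2  # camera index (starting from 2)
--         camera1_key = f"Camera1_1-{other_camera_index}"  # e.g., "Camera1_1-2", "Camera1_1-3", etc.
--         camera1_keypoints_pairs[camera1_key] = []
--
--         for frame in camera_pair:
--             frame_keypoints_camera1 = []
--             for keypoints_pair in frame:
--                 if len(keypoints_pair) == 2:
--                     frame_keypoints_camera1.append(keypoints_pair[0])
--
--             camera1_keypoints_pairs[camera1_key].append(frame_keypoints_camera1)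
--
--     # Extract keypoints for other cameras
--     other_cameras_keypoints = {}
--     for i, camera_pair in enumerate(paired_keypoints_list):
--         other_camera_index = i + 2  # camera index (starting from 2)
--         other_cameras_keypoints[other_camera_index] = []
--
--         for frame in camera_pair:
--             frame_keypoints_other_camera = []
--             for keypoints_pair in frame:
--                 if len(keypoints_pair) == 2:
--                     frame_keypoints_other_camera.append(keypoints_pair[1])
--
--             other_cameras_keypoints[other_camera_index].append(frame_keypoints_other_camera)
--
--     return camera1_keypoints_pairs, other_cameras_keypoints
-- ===== SOURCE B (Python) =====
-- def extract_individual_camera_keypoints(paired_keypoints_list):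
--     """Single pass over the pairs: each frame is split once (filter then unzip)
--     and both dictionaries are filled in the same loop."""
--     camera1_keypoints_pairs = {}
--     other_cameras_keypoints = {}
--     for i, camera_pair in enumerate(paired_keypoints_list):
--         other_camera_index = i + 2
--         frames = []
--         for frame in camera_pair:
--             kept = [kp for kp in frame if len(kp) == 2]
--             frames.append(([kp[0] for kp in kept], [kp[1] for kp in kept]))
--         camera1_keypoints_pairs[f"Camera1_1-{other_camera_index}"] = [f for f, _ in frames]
--         other_cameras_keypoints[other_camera_index] = [s for _, s in frames]
--     return camera1_keypoints_pairs, other_cameras_keypoints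
-- ===== Notes on version B (the rewrite author's own statement) =====
-- stated objective: simpler
-- what changed: A's two separate enumerate passes (each re-scanning every frame) are merged into one pass that splits each frame once into its camera-1/other-camera halves (filter then unzip) and fills both dictionaries in the same loop.
import Mathlib
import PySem

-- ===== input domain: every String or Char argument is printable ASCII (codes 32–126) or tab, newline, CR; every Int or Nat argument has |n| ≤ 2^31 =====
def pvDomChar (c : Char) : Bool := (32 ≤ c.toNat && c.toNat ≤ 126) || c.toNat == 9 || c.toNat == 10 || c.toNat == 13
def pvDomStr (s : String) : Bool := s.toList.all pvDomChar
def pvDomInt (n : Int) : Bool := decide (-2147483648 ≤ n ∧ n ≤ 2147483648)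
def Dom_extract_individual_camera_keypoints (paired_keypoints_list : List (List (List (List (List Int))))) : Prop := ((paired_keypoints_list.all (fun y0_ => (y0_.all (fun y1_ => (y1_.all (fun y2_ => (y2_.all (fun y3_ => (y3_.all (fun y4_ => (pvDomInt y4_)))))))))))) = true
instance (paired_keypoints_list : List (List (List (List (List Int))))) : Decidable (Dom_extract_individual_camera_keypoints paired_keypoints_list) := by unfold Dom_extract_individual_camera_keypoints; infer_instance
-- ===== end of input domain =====

-- B merges A's two separate enumerate passes into one loop that splits each frame once
-- (filter then unzip) and fills both dictionaries together (objective: simpler, one pass).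

-- ===== PORT A =====
-- kp[0] / kp[1] are taken under the len(kp) == 2 guard, so the index is in range;
-- pyGetD with an unreachable default is exact there.
def extract_individual_camera_keypoints (paired_keypoints_list : List (List (List (List (List Int))))) : (List (String × List (List (List Int)))) × (List (Int × List (List (List Int)))) :=
  let camera1_keypoints_pairs : PySem.Dict String (List (List (List Int))) :=
    (PySem.List.enumerate paired_keypoints_list).foldl (fun d ic =>
      let other_camera_index := ic.1 + 2
      let camera1_key := "Camera1_1-" ++ PySem.Int.toStr other_camera_index
      let d := d.insert camera1_key []
      ic.2.foldl (fun d frame =>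
        let frame_keypoints_camera1 :=
          frame.foldl (fun acc keypoints_pair =>
            if keypoints_pair.length == 2 then acc ++ [PySem.List.pyGetD keypoints_pair 0 []] else acc) []
        d.modify camera1_key [] (fun l => l ++ [frame_keypoints_camera1])) d)
      PySem.Dict.empty
  let other_cameras_keypoints : PySem.Dict Int (List (List (List Int))) :=
    (PySem.List.enumerate paired_keypoints_list).foldl (fun d ic =>
      let other_camera_index := ic.1 + 2
      let d := d.insert other_camera_index []
      ic.2.foldl (fun d frame =>
        let frame_keypoints_other_camera :=
          frame.foldl (fun acc keypoints_pair =>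
            if keypoints_pair.length == 2 then acc ++ [PySem.List.pyGetD keypoints_pair 1 []] else acc) []
        d.modify other_camera_index [] (fun l => l ++ [frame_keypoints_other_camera])) d)
      PySem.Dict.empty
  (camera1_keypoints_pairs.items, other_cameras_keypoints.items)

-- ===== PORT B =====
def extract_individual_camera_keypoints_alt (paired_keypoints_list : List (List (List (List (List Int))))) : (List (String × List (List (List Int)))) × (List (Int × List (List (List Int)))) :=
  let res : PySem.Dict String (List (List (List Int))) × PySem.Dict Int (List (List (List Int))) :=
    (PySem.List.enumerate paired_keypoints_list).foldl (fun co ic =>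
      let other_camera_index := ic.1 + 2
      let frames := ic.2.map (fun frame =>
        let kept := frame.filter (fun kp => kp.length == 2)
        (kept.map (fun kp => PySem.List.pyGetD kp 0 []),
         kept.map (fun kp => PySem.List.pyGetD kp 1 [])))
      (co.1.insert ("Camera1_1-" ++ PySem.Int.toStr other_camera_index) (frames.map Prod.fst),
       co.2.insert other_camera_index (frames.map Prod.snd)))
      (PySem.Dict.empty, PySem.Dict.empty)
  (res.1.items, res.2.items)

-- ===== PRECONDITION & SPEC =====
def Spec_extract_individual_camera_keypoints (paired_keypoints_list : List (List (List (List (List Int))))) (out : (List (String × List (List (List Int)))) × (List (Int × List (List (List Int))))) : Prop := out = extract_individual_camera_keypoints_alt paired_keypoints_list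
instance (paired_keypoints_list : List (List (List (List (List Int))))) (out : (List (String × List (List (List Int)))) × (List (Int × List (List (List Int))))) : Decidable (Spec_extract_individual_camera_keypoints paired_keypoints_list out) := by unfold Spec_extract_individual_camera_keypoints; infer_instance

-- ===== CLAIM (what is proved, stated in full; the proofs are below) =====
def Claim_equal_extract_individual_camera_keypoints : Prop := ∀ (paired_keypoints_list : List (List (List (List (List Int))))), Dom_extract_individual_camera_keypoints paired_keypoints_list → Spec_extract_individual_camera_keypoints paired_keypoints_list (extract_individual_camera_keypoints paired_keypoints_list)

-- ===== LEMMAS AND PROOFS =====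

-- A's per-frame accumulation loop is filter-then-map.
theorem pv_frame_eq (j : Int) (frame : List (List (List Int))) :
    frame.foldl (fun acc kp => if kp.length == 2 then acc ++ [PySem.List.pyGetD kp j []] else acc) [] =
    (frame.filter (fun kp => kp.length == 2)).map (fun kp => PySem.List.pyGetD kp j []) := by
  simpa using PySem.List.foldl_append_if (fun kp => kp.length == 2)
    (fun kp => PySem.List.pyGetD kp j []) frame []

-- appending through modify at a just-inserted key is one insert of the whole list
theorem pv_modify_insert {κ : Type} [BEq κ] [LawfulBEq κ]
    (d : PySem.Dict κ (List (List (List Int)))) (k : κ) (a : List (List (List Int)))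
    (f : List (List (List Int)) → List (List (List Int))) :
    (d.insert k a).modify k [] f = d.insert k (f a) := by
  simp [PySem.Dict.modify, PySem.Dict.getD_insert_self, PySem.Dict.insert_insert_self]

-- A's inner frame loop, started at a fresh (just inserted) key, inserts the full mapped list
theorem pv_camloop {κ : Type} [BEq κ] [LawfulBEq κ]
    (k : κ) (g : List (List (List Int)) → List (List Int)) :
    ∀ (cp : List (List (List (List Int)))) (d : PySem.Dict κ (List (List (List Int))))
      (a : List (List (List Int))),
      cp.foldl (fun d frame => d.modify k [] (fun l => l ++ [g frame])) (d.insert k a) =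
      d.insert k (a ++ cp.map g)
  | [], d, a => by simp
  | frame :: cp, d, a => by
    have h := pv_camloop k g cp d (a ++ [g frame])
    simp only [List.foldl_cons, pv_modify_insert] at *
    simpa using h
-- a foldl producing a pair of independently-updated dicts is the pair of the two foldls
theorem pv_pairfold {α β γ : Type} (f1 : α → γ → α) (f2 : β → γ → β) :
    ∀ (l : List γ) (c : α) (o : β),
      l.foldl (fun p x => (f1 p.1 x, f2 p.2 x)) (c, o) = (l.foldl f1 c, l.foldl f2 o)
  | [], _, _ => rfl
  | _ :: l, c, o => pv_pairfold f1 f2 l _ _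

-- ===== VERDICT (by name: the statement is the Claim_ definition above) =====
theorem extract_individual_camera_keypoints_spec : Claim_equal_extract_individual_camera_keypoints := by
  intro pl _
  show extract_individual_camera_keypoints pl = extract_individual_camera_keypoints_alt pl
  unfold extract_individual_camera_keypoints extract_individual_camera_keypoints_alt
  dsimp only
  rw [pv_pairfold
    (fun (c : PySem.Dict String (List (List (List Int)))) (ic : Int × List (List (List (List Int)))) =>
      c.insert ("Camera1_1-" ++ PySem.Int.toStr (ic.1 + 2))
        (List.map Prod.fst (List.map (fun frame =>
          (List.map (fun kp => PySem.List.pyGetD kp 0 []) (List.filter (fun kp => kp.length == 2) frame),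
           List.map (fun kp => PySem.List.pyGetD kp 1 []) (List.filter (fun kp => kp.length == 2) frame))) ic.2)))
    (fun (o : PySem.Dict Int (List (List (List Int)))) (ic : Int × List (List (List (List Int)))) =>
      o.insert (ic.1 + 2)
        (List.map Prod.snd (List.map (fun frame =>
          (List.map (fun kp => PySem.List.pyGetD kp 0 []) (List.filter (fun kp => kp.length == 2) frame),
           List.map (fun kp => PySem.List.pyGetD kp 1 []) (List.filter (fun kp => kp.length == 2) frame))) ic.2)))
    (PySem.List.enumerate pl) PySem.Dict.empty PySem.Dict.empty]
  simp only [pv_frame_eq, pv_camloop, List.map_map, List.nil_append, Function.comp_def]
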